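-- pv_equiv track=rewrite | github.com/houdak/Rosalind | ITWV.py | InterwovenStrings
-- ===== SOURCE A (Python) =====
-- def MakeMatrixWoven(p,q,w):
--     """ Makes dynamic matrix to decern whether
--     window (w) is an interweaving of p & q """
--     # initialize matrix
--     k = len(p)
--     l = len(q)
--     # row/i = p, col/j = q
--     matrix = [['' for j in range(l+1)] for i in range(k+1)]
--     # fill in first row & col
--     matrix[0][0] = 'T'
--     for j in range(1,l+1):
--         refchar = w[j-1]
--         if (    q[j-1] == refchar
--             and matrix[0][j-1] == 'T' ):
--             matrix[0][j] = 'T'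
--         else:
--             matrix[0][j] = 'F'
--
--     for i in range(1,k+1):
--         refchar = w[i-1]
--         if (    p[i-1] == refchar
--             and matrix[i-1][0] == 'T'):
--             matrix[i][0] = 'T'
--         else:
--             matrix[i][0] = 'F'
--
--     # Now fill up the rest!
--     for i in range(1,k+1): # row
--         for j in range(1,l+1): # col
--             refchar = w[i+j-1]
--             if (    p[i-1] == refchar
--                 and matrix[i-1][j] == 'T'):
--                 matrix[i][j] = 'T'
--             elif (    q[j-1] == refchar
--                   and matrix[i][j-1] == 'T'):
--                 matrix[i][j] = 'T'
--             else:
--                 matrix[i][j] = 'F'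
--
--     if matrix[k][l] == 'T':
--         return '1'
--     else:
--         return '0'
--
-- def InterwovenStrings(t,p,q):
--     """ Returns 1 if substring of t
--     is p &q interwoven, 0 if false. """
--     substrings = FindWindows(t,p,q)
--     if substrings == []:
--         return '0'
--     else:
--         # Check if substring actually is p&q interwoven
--         for window in substrings:
--             if MakeMatrixWoven(p,q,window) == '1':
--                 return '1'
--         return '0'
--
-- def FindWindows(t,p,q):
--     """ Looks for regions in t which match the following properties:
--     (1) Start with first char in p or q
--     (2) len(window) == len(p) + len(q)
--     (3) all characters in window are in either p or q
--     returns list of those windows as strings """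
--     k = len(p) + len(q)
--     windows = []
--     for i in range(0,len(t)-k+1):
--         temp_window = t[i:i+k]
--         if (    temp_window[0] != p[0]
--             and temp_window[0] != q[0]):
--             continue # won't work, not right starting char
--         else:
--             check = True
--             for char in temp_window:
--                 if (char not in p and char not in q):
--                     check = False
--                     break
--             if check == True:
--                 windows.append(temp_window)
--     return windows
-- ===== SOURCE B (Python) =====
-- def InterwovenStrings(t, p, q):
--     """ Returns 1 if some length-(len(p)+len(q)) window of t is an
--     interweaving of p and q, 0 otherwise.  Forward NFA-style scan:
--     for each window keep the set of counts i of characters already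
--     taken from p; no prefilter and no (k+1)x(l+1) matrix. """
--     k = len(p) + len(q)
--     for s in range(len(t) - k + 1):
--         w = t[s:s + k]
--         reach = {0}
--         for m, c in enumerate(w):
--             nxt = set()
--             for i in reach:
--                 if i < len(p) and p[i] == c:
--                     nxt.add(i + 1)
--                 j = m - i
--                 if j < len(q) and q[j] == c:
--                     nxt.add(i)
--             reach = nxt
--         if len(p) in reach:
--             return '1'
--     return '0'
-- ===== Notes on version B (the rewrite author's own statement) =====
-- stated objective: alternative
-- what changed: Replaces A's two-stage design (FindWindows prefilter plus a (|p|+1)x(|q|+1) bottom-up T/F matrix per window) with a single forward NFA-style scan: for each window keep the set of counts of characters already taken from p, updating it per window character; no prefilter and no matrix.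
-- outside the precondition, e.g. on InterwovenStrings('ab', 'ab', ''): A returns '1', B returns '1'
import Mathlib
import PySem

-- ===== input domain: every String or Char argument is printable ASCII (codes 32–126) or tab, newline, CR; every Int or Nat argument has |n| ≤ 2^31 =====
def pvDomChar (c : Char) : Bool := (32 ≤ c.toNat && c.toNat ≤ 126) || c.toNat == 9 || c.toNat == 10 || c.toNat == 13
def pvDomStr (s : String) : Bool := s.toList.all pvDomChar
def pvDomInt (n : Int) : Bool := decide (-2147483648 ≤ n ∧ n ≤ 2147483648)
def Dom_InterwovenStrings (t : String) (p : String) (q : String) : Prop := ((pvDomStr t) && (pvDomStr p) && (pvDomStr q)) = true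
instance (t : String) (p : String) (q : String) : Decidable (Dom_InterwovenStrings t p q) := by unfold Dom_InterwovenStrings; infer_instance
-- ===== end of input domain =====

-- B replaces A's prefilter + per-window bottom-up T/F matrix by a single forward
-- set-of-reachable-prefix-counts scan per window (alternative decomposition, same cost class).


-- ===== PORT A =====
-- The matrix is ported as a function Nat → Nat → String updated pointwise
-- (matrix[i][j] = v becomes pvUpd m i j v); cells hold "", "T", "F" exactly as in A.
abbrev PvMat := Nat → Nat → String

def pvUpd (m : PvMat) (i j : Nat) (v : String) : PvMat :=
  fun a b => if a = i ∧ b = j then v else m a b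

-- for j in range(1, l+1): fill matrix[0][j]  (counter n = how many of these j have run)
def pvFillRow0 (q w : List Char) (m : PvMat) : Nat → PvMat
  | 0 => m
  | n + 1 =>
    let m' := pvFillRow0 q w m n
    if q.getD n ' ' == w.getD n ' ' && m' 0 n == "T"
    then pvUpd m' 0 (n + 1) "T" else pvUpd m' 0 (n + 1) "F"

-- for i in range(1, k+1): fill matrix[i][0]
def pvFillCol0 (p w : List Char) (m : PvMat) : Nat → PvMat
  | 0 => m
  | n + 1 =>
    let m' := pvFillCol0 p w m n
    if p.getD n ' ' == w.getD n ' ' && m' n 0 == "T"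
    then pvUpd m' (n + 1) 0 "T" else pvUpd m' (n + 1) 0 "F"

-- inner 'for j in range(1, l+1)' of the nested fill, for row i = i' + 1
def pvFillRow (p q w : List Char) (i' : Nat) (m : PvMat) : Nat → PvMat
  | 0 => m
  | n + 1 =>
    let m' := pvFillRow p q w i' m n
    let rc := w.getD (i' + n + 1) ' '   -- w[i + j - 1] at i = i'+1, j = n+1
    if p.getD i' ' ' == rc && m' i' (n + 1) == "T" then pvUpd m' (i' + 1) (n + 1) "T"
    else if q.getD n ' ' == rc && m' (i' + 1) n == "T" then pvUpd m' (i' + 1) (n + 1) "T"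
    else pvUpd m' (i' + 1) (n + 1) "F"

-- outer 'for i in range(1, k+1)'
def pvFillRows (p q w : List Char) (l : Nat) (m : PvMat) : Nat → PvMat
  | 0 => m
  | n + 1 => pvFillRow p q w n (pvFillRows p q w l m n) l

def pvMakeMatrixWoven (p q w : List Char) : String :=
  let k := p.length
  let l := q.length
  let m0 : PvMat := fun _ _ => ""
  let m1 := pvUpd m0 0 0 "T"
  let m2 := pvFillRow0 q w m1 l
  let m3 := pvFillCol0 p w m2 k
  let m4 := pvFillRows p q w l m3 k
  if m4 k l == "T" then "1" else "0"

-- for char in temp_window: if char not in p and char not in q: check = False; break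
-- ('char in p' on a 1-character string is membership of that character)
def pvCheckChars (p q : List Char) : List Char → Bool
  | [] => true
  | c :: cs => if !(p.contains c) && !(q.contains c) then false else pvCheckChars p q cs

-- range(0, len(t)-k+1) has max(0, len(t)-k+1) = len(t)+1-k (Nat subtraction) iterations;
-- temp_window[0], p[0], q[0] are read with getD — under Pre_ these reads are in range.
def pvFindWindows (t p q : List Char) : List (List Char) :=
  let k := p.length + q.length
  (List.range (t.length + 1 - k)).foldl
    (fun acc (i : Nat) =>
      let w := PySem.List.slice t (some (i : Int)) (some ((i : Int) + (k : Int)))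
      if !(w.getD 0 ' ' == p.getD 0 ' ') && !(w.getD 0 ' ' == q.getD 0 ' ') then acc
      else if pvCheckChars p q w then acc ++ [w] else acc)
    []

-- for window in substrings: if MakeMatrixWoven(p,q,window) == '1': return '1' ... return '0'
def pvScanWindows (p q : List Char) : List (List Char) → String
  | [] => "0"
  | w :: ws => if pvMakeMatrixWoven p q w == "1" then "1" else pvScanWindows p q ws

def InterwovenStrings (t : String) (p : String) (q : String) : String :=
  let tl := t.toList
  let pl := p.toList
  let ql := q.toList
  let subs := pvFindWindows tl pl ql
  if subs = [] then "0" else pvScanWindows pl ql subs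

-- ===== PORT B =====
-- one step of B's inner 'for i in reach' loop, at window position m (j = m - i;
-- i ≤ m throughout, so Nat subtraction agrees with Python's)
def pvStepBody (p q : List Char) (c : Char) (m : Nat) (nxt : PySem.Set Nat) (i : Nat) : PySem.Set Nat :=
  let nxt1 := if i < p.length ∧ p.getD i ' ' == c then PySem.Set.add nxt (i + 1) else nxt
  if m - i < q.length ∧ q.getD (m - i) ' ' == c then PySem.Set.add nxt1 i else nxt1

def pvStep (p q w : List Char) (m : Nat) (reach : PySem.Set Nat) : PySem.Set Nat :=
  reach.foldl (pvStepBody p q (w.getD m ' ') m) PySem.Set.empty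

-- reach after the first m iterations of 'for m in range(k)'
def pvReach (p q w : List Char) : Nat → PySem.Set Nat
  | 0 => PySem.Set.add PySem.Set.empty 0      -- {0}
  | m + 1 => pvStep p q w m (pvReach p q w m)

def pvWindowOK (p q w : List Char) (k : Nat) : Bool :=
  PySem.Set.contains (pvReach p q w k) p.length

-- for s in range(len(t)-k+1) with 'return' on success; n = iterations remaining
def pvAltScan (t p q : List Char) (k : Nat) : Nat → Nat → String
  | _, 0 => "0"
  | s, n + 1 =>
    if pvWindowOK p q (PySem.List.slice t (some (s : Int)) (some ((s : Int) + (k : Int)))) k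
    then "1" else pvAltScan t p q k (s + 1) n

def InterwovenStrings_alt (t : String) (p : String) (q : String) : String :=
  let tl := t.toList
  let pl := p.toList
  let ql := q.toList
  let k := pl.length + ql.length
  pvAltScan tl pl ql k 0 (tl.length + 1 - k)

-- ===== PRECONDITION & SPEC =====
-- Pre_ excludes the inputs where p or q is empty while the window loop runs
-- (len(t) ≥ len(p)+len(q)): there FindWindows indexes an empty string (p[0]/q[0]/
-- window[0]) and A raises IndexError on most such inputs, returning only
-- data-dependently on the rest (B agrees with A on those returns, see claim cites).
def Pre_InterwovenStrings (t : String) (p : String) (q : String) : Prop :=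
  t.toList.length < p.toList.length + q.toList.length ∨ (p.toList ≠ [] ∧ q.toList ≠ [])
instance (t : String) (p : String) (q : String) : Decidable (Pre_InterwovenStrings t p q) := by
  unfold Pre_InterwovenStrings; infer_instance

def pvWitness_InterwovenStrings : String × String × String := ("aba", "ab", "b")

def Spec_InterwovenStrings (t : String) (p : String) (q : String) (out : String) : Prop := out = InterwovenStrings_alt t p q
instance (t : String) (p : String) (q : String) (out : String) : Decidable (Spec_InterwovenStrings t p q out) := by unfold Spec_InterwovenStrings; infer_instance

-- ===== CLAIM (what is proved, stated in full; the proofs are below) =====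
def Claim_equal_InterwovenStrings : Prop := ∀ (t : String) (p : String) (q : String), Dom_InterwovenStrings t p q → Pre_InterwovenStrings t p q → Spec_InterwovenStrings t p q (InterwovenStrings t p q)

-- ===== LEMMAS AND PROOFS =====

-- the common value of both programs per window: J i j ↔ p[:i] and q[:j] interleave to w[:i+j]
def pvJ (p q w : List Char) : Nat → Nat → Bool
  | 0, 0 => true
  | 0, j + 1 => (q.getD j ' ' == w.getD j ' ') && pvJ p q w 0 j
  | i + 1, 0 => (p.getD i ' ' == w.getD i ' ') && pvJ p q w i 0
  | i + 1, j + 1 =>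
      ((p.getD i ' ' == w.getD (i + j + 1) ' ') && pvJ p q w i (j + 1))
      || ((q.getD j ' ' == w.getD (i + j + 1) ' ') && pvJ p q w (i + 1) j)

def pvTF (b : Bool) : String := if b then "T" else "F"

lemma pvTF_eq_T (b : Bool) : (pvTF b == "T") = b := by cases b <;> rfl

lemma pvUpd_self (m : PvMat) (i j : Nat) (v : String) : pvUpd m i j v i j = v := by
  simp [pvUpd]

lemma pvUpd_ne (m : PvMat) (i j a b : Nat) (v : String) (h : ¬(a = i ∧ b = j)) :
    pvUpd m i j v a b = m a b := by
  simp [pvUpd, h]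

lemma pvFillRow0_correct (p q w : List Char) (m : PvMat) (h00 : m 0 0 = "T") :
    ∀ n, ∀ b ≤ n, pvFillRow0 q w m n 0 b = pvTF (pvJ p q w 0 b) := by
  intro n
  induction n with
  | zero =>
    intro b hb
    have hb0 : b = 0 := Nat.le_zero.mp hb
    subst hb0
    simpa [pvFillRow0, pvTF, pvJ] using h00
  | succ n ih =>
    intro b hb
    by_cases hb' : b ≤ n
    · have heq : pvFillRow0 q w m (n + 1) 0 b = pvFillRow0 q w m n 0 b := by
        simp only [pvFillRow0]
        split_ifs <;> exact pvUpd_ne _ _ _ _ _ _ (by rintro ⟨h1, h2⟩; omega)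
      rw [heq]; exact ih b hb'
    · have hb1 : b = n + 1 := by omega
      subst hb1
      have hcell : pvFillRow0 q w m (n + 1) 0 (n + 1)
          = pvTF ((q.getD n ' ' == w.getD n ' ') && (pvFillRow0 q w m n 0 n == "T")) := by
        simp only [pvFillRow0, pvTF]
        split_ifs <;> rw [pvUpd_self]
      rw [hcell, ih n le_rfl, pvTF_eq_T]
      simp only [pvJ]

lemma pvFillCol0_untouched (p w : List Char) (m : PvMat) :
    ∀ n a b, (b ≠ 0 ∨ a = 0 ∨ n < a) → pvFillCol0 p w m n a b = m a b := by
  intro n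
  induction n with
  | zero => intro a b _; rfl
  | succ n ih =>
    intro a b h
    simp only [pvFillCol0]
    split_ifs <;>
      rw [pvUpd_ne _ _ _ _ _ _ (by rintro ⟨h1, h2⟩; rcases h with h | h | h <;> omega)] <;>
      exact ih a b (by rcases h with h | h | h <;>
                    [exact Or.inl h; exact Or.inr (Or.inl h); exact Or.inr (Or.inr (by omega))])

lemma pvFillCol0_correct (p q w : List Char) (m : PvMat) (h00 : m 0 0 = "T") :
    ∀ n, ∀ a ≤ n, pvFillCol0 p w m n a 0 = pvTF (pvJ p q w a 0) := by
  intro n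
  induction n with
  | zero =>
    intro a ha
    have ha0 : a = 0 := Nat.le_zero.mp ha
    subst ha0
    simpa [pvFillCol0, pvTF, pvJ] using h00
  | succ n ih =>
    intro a ha
    by_cases ha' : a ≤ n
    · have heq : pvFillCol0 p w m (n + 1) a 0 = pvFillCol0 p w m n a 0 := by
        simp only [pvFillCol0]
        split_ifs <;> exact pvUpd_ne _ _ _ _ _ _ (by rintro ⟨h1, h2⟩; omega)
      rw [heq]; exact ih a ha'
    · have ha1 : a = n + 1 := by omega
      subst ha1
      have hcell : pvFillCol0 p w m (n + 1) (n + 1) 0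
          = pvTF ((p.getD n ' ' == w.getD n ' ') && (pvFillCol0 p w m n n 0 == "T")) := by
        simp only [pvFillCol0, pvTF]
        split_ifs <;> rw [pvUpd_self]
      rw [hcell, ih n le_rfl, pvTF_eq_T]
      simp only [pvJ]

lemma pvFillRow_untouched (p q w : List Char) (i' : Nat) (m : PvMat) :
    ∀ n a b, (a ≠ i' + 1 ∨ b = 0 ∨ n < b) → pvFillRow p q w i' m n a b = m a b := by
  intro n
  induction n with
  | zero => intro a b _; rfl
  | succ n ih =>
    intro a b h
    simp only [pvFillRow]
    split_ifs <;>
      rw [pvUpd_ne _ _ _ _ _ _ (by rintro ⟨h1, h2⟩; rcases h with h | h | h <;> omega)] <;>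
      exact ih a b (by rcases h with h | h | h <;>
                    [exact Or.inl h; exact Or.inr (Or.inl h); exact Or.inr (Or.inr (by omega))])

lemma pvFillRow_correct (p q w : List Char) (i' : Nat) (m : PvMat) (l : Nat)
    (hrow : ∀ b ≤ l, m i' b = pvTF (pvJ p q w i' b))
    (hz : m (i' + 1) 0 = pvTF (pvJ p q w (i' + 1) 0)) :
    ∀ n, n ≤ l → ∀ b ≤ n, pvFillRow p q w i' m n (i' + 1) b = pvTF (pvJ p q w (i' + 1) b) := by
  intro n
  induction n with
  | zero =>
    intro _ b hb
    have hb0 : b = 0 := Nat.le_zero.mp hb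
    subst hb0
    exact hz
  | succ n ih =>
    intro hn b hb
    by_cases hb' : b ≤ n
    · have heq : pvFillRow p q w i' m (n + 1) (i' + 1) b = pvFillRow p q w i' m n (i' + 1) b := by
        simp only [pvFillRow]
        split_ifs <;> exact pvUpd_ne _ _ _ _ _ _ (by rintro ⟨h1, h2⟩; omega)
      rw [heq]; exact ih (by omega) b hb'
    · have hb1 : b = n + 1 := by omega
      subst hb1
      have hA : pvFillRow p q w i' m n i' (n + 1) = m i' (n + 1) :=
        pvFillRow_untouched p q w i' m n i' (n + 1) (Or.inl (by omega))
      have hB : pvFillRow p q w i' m n (i' + 1) n = pvTF (pvJ p q w (i' + 1) n) :=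
        ih (by omega) n le_rfl
      have hcell : pvFillRow p q w i' m (n + 1) (i' + 1) (n + 1)
          = pvTF (((p.getD i' ' ' == w.getD (i' + n + 1) ' ')
                    && (pvFillRow p q w i' m n i' (n + 1) == "T"))
                || ((q.getD n ' ' == w.getD (i' + n + 1) ' ')
                    && (pvFillRow p q w i' m n (i' + 1) n == "T"))) := by
        simp only [pvFillRow]
        set c1 := (p.getD i' ' ' == w.getD (i' + n + 1) ' '
                    && (pvFillRow p q w i' m n i' (n + 1) == "T")) with hc1def
        set c2 := (q.getD n ' ' == w.getD (i' + n + 1) ' '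
                    && (pvFillRow p q w i' m n (i' + 1) n == "T")) with hc2def
        split_ifs with h1 h2
        · rw [pvUpd_self, show (c1 || c2) = true by rw [h1]; exact Bool.true_or _]; rfl
        · rw [Bool.not_eq_true] at h1
          rw [pvUpd_self, show (c1 || c2) = true by rw [h1, h2]; rfl]; rfl
        · rw [Bool.not_eq_true] at h1 h2
          rw [pvUpd_self, show (c1 || c2) = false by rw [h1, h2]; rfl]; rfl
      rw [hcell, hA, hB, hrow (n + 1) (by omega), pvTF_eq_T, pvTF_eq_T]
      simp only [pvJ]

lemma pvFillRows_untouched (p q w : List Char) (l : Nat) (m : PvMat) :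
    ∀ n a b, (a = 0 ∨ b = 0 ∨ l < b) → pvFillRows p q w l m n a b = m a b := by
  intro n
  induction n with
  | zero => intro a b _; rfl
  | succ n ih =>
    intro a b h
    simp only [pvFillRows]
    rw [pvFillRow_untouched p q w n (pvFillRows p q w l m n) l a b
        (by rcases h with h | h | h <;>
            [exact Or.inl (by omega); exact Or.inr (Or.inl h); exact Or.inr (Or.inr h)])]
    exact ih a b h

lemma pvFillRows_correct (p q w : List Char) (l : Nat) (m : PvMat) (k : Nat)
    (h0 : ∀ b ≤ l, m 0 b = pvTF (pvJ p q w 0 b))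
    (hc : ∀ a ≤ k, m a 0 = pvTF (pvJ p q w a 0)) :
    ∀ n, n ≤ k → ∀ a ≤ n, ∀ b ≤ l, pvFillRows p q w l m n a b = pvTF (pvJ p q w a b) := by
  intro n
  induction n with
  | zero =>
    intro _ a ha b hb
    have ha0 : a = 0 := Nat.le_zero.mp ha
    subst ha0
    exact h0 b hb
  | succ n ih =>
    intro hn a ha b hb
    simp only [pvFillRows]
    by_cases ha' : a ≤ n
    · rw [pvFillRow_untouched p q w n (pvFillRows p q w l m n) l a b (Or.inl (by omega))]
      exact ih (by omega) a ha' b hb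
    · have ha1 : a = n + 1 := by omega
      subst ha1
      refine pvFillRow_correct p q w n (pvFillRows p q w l m n) l ?_ ?_ l le_rfl b hb
      · intro b' hb'
        exact ih (by omega) n le_rfl b' hb'
      · rw [pvFillRows_untouched p q w l m n (n + 1) 0 (Or.inr (Or.inl rfl))]
        exact hc (n + 1) (by omega)

lemma pvMakeMatrixWoven_eq (p q w : List Char) :
    pvMakeMatrixWoven p q w = if pvJ p q w p.length q.length then "1" else "0" := by
  have h00 : (pvUpd (fun _ _ => "") 0 0 "T") 0 0 = "T" := pvUpd_self _ _ _ _
  have h2row : ∀ b ≤ q.length,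
      pvFillRow0 q w (pvUpd (fun _ _ => "") 0 0 "T") q.length 0 b = pvTF (pvJ p q w 0 b) :=
    pvFillRow0_correct p q w _ h00 q.length
  have h200 : pvFillRow0 q w (pvUpd (fun _ _ => "") 0 0 "T") q.length 0 0 = "T" := by
    rw [h2row 0 (Nat.zero_le _)]; simp [pvTF, pvJ]
  have h3col : ∀ a ≤ p.length,
      pvFillCol0 p w (pvFillRow0 q w (pvUpd (fun _ _ => "") 0 0 "T") q.length) p.length a 0
        = pvTF (pvJ p q w a 0) :=
    pvFillCol0_correct p q w _ h200 p.length
  have h3row : ∀ b ≤ q.length,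
      pvFillCol0 p w (pvFillRow0 q w (pvUpd (fun _ _ => "") 0 0 "T") q.length) p.length 0 b
        = pvTF (pvJ p q w 0 b) := by
    intro b hb
    by_cases hb0 : b = 0
    · subst hb0; exact h3col 0 (Nat.zero_le _)
    · rw [pvFillCol0_untouched p w _ p.length 0 b (Or.inl hb0)]
      exact h2row b hb
  have h4 : pvFillRows p q w q.length
      (pvFillCol0 p w (pvFillRow0 q w (pvUpd (fun _ _ => "") 0 0 "T") q.length) p.length)
      p.length p.length q.length = pvTF (pvJ p q w p.length q.length) :=
    pvFillRows_correct p q w q.length _ p.length h3row h3col p.length le_rfl p.length le_rfl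
      q.length le_rfl
  show (if pvFillRows p q w q.length
      (pvFillCol0 p w (pvFillRow0 q w (pvUpd (fun _ _ => "") 0 0 "T") q.length) p.length)
      p.length p.length q.length == "T" then "1" else "0") = _
  rw [h4, pvTF_eq_T]

-- B side --------------------------------------------------------------------

lemma mem_pvStepBody (p q : List Char) (c : Char) (m : Nat) (nxt : PySem.Set Nat) (i x : Nat) :
    x ∈ pvStepBody p q c m nxt i ↔
      x ∈ nxt ∨ (i < p.length ∧ p.getD i ' ' = c ∧ x = i + 1)
        ∨ (m - i < q.length ∧ q.getD (m - i) ' ' = c ∧ x = i) := by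
  simp only [pvStepBody]
  split_ifs <;> simp_all only [PySem.Set.mem_add, beq_iff_eq, not_and] <;> tauto

lemma mem_foldl_pvStepBody (p q : List Char) (c : Char) (m : Nat) :
    ∀ (l : List Nat) (acc : PySem.Set Nat) (x : Nat),
      x ∈ l.foldl (pvStepBody p q c m) acc ↔
        x ∈ acc ∨ ∃ i ∈ l,
          (i < p.length ∧ p.getD i ' ' = c ∧ x = i + 1)
          ∨ (m - i < q.length ∧ q.getD (m - i) ' ' = c ∧ x = i) := by
  intro l
  induction l with
  | nil => simp
  | cons a l ih =>
    intro acc x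
    rw [List.foldl_cons, ih, mem_pvStepBody]
    simp only [List.mem_cons]
    constructor
    · rintro ((h | h | h) | ⟨i, hi, hc⟩)
      · exact Or.inl h
      · exact Or.inr ⟨a, Or.inl rfl, Or.inl h⟩
      · exact Or.inr ⟨a, Or.inl rfl, Or.inr h⟩
      · exact Or.inr ⟨i, Or.inr hi, hc⟩
    · rintro (h | ⟨i, (rfl | hi), hc⟩)
      · exact Or.inl (Or.inl h)
      · rcases hc with hc | hc
        · exact Or.inl (Or.inr (Or.inl hc))
        · exact Or.inl (Or.inr (Or.inr hc))
      · exact Or.inr ⟨i, hi, hc⟩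

lemma mem_pvStep (p q w : List Char) (m : Nat) (reach : PySem.Set Nat) (x : Nat) :
    x ∈ pvStep p q w m reach ↔
      ∃ i ∈ reach,
        (i < p.length ∧ p.getD i ' ' = w.getD m ' ' ∧ x = i + 1) ∨
        (m - i < q.length ∧ q.getD (m - i) ' ' = w.getD m ' ' ∧ x = i) := by
  rw [show pvStep p q w m reach
      = reach.foldl (pvStepBody p q (w.getD m ' ') m) PySem.Set.empty from rfl,
    mem_foldl_pvStepBody]
  simp [PySem.Set.empty]

lemma mem_pvReach (p q w : List Char) :
    ∀ m x, x ∈ pvReach p q w m ↔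
      (x ≤ m ∧ x ≤ p.length ∧ m - x ≤ q.length ∧ pvJ p q w x (m - x) = true) := by
  intro m
  induction m with
  | zero =>
    intro x
    rw [show pvReach p q w 0 = PySem.Set.add PySem.Set.empty 0 from rfl]
    rw [PySem.Set.mem_add]
    simp only [PySem.Set.empty, List.not_mem_nil, false_or]
    constructor
    · rintro rfl
      exact ⟨le_rfl, Nat.zero_le _, by omega, by simp [pvJ]⟩
    · rintro ⟨h1, _, _, _⟩; omega
  | succ m ih =>
    intro x
    rw [show pvReach p q w (m + 1) = pvStep p q w m (pvReach p q w m) from rfl, mem_pvStep]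
    constructor
    · rintro ⟨i, hi, hcase⟩
      obtain ⟨hi1, hi2, hi3, hi4⟩ := (ih i).mp hi
      rcases hcase with ⟨hip, hpc, rfl⟩ | ⟨hiq, hqc, rfl⟩
      · refine ⟨by omega, by omega, by omega, ?_⟩
        have hmi : m + 1 - (i + 1) = m - i := by omega
        rw [hmi]
        by_cases him : i = m
        · subst him
          rw [Nat.sub_self] at hi4 ⊢
          simp only [pvJ, Bool.and_eq_true]
          exact ⟨beq_iff_eq.mpr hpc, hi4⟩
        · obtain ⟨j', hj'⟩ : ∃ j', m - i = j' + 1 := ⟨m - i - 1, by omega⟩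
          rw [hj']
          simp only [pvJ, Bool.or_eq_true, Bool.and_eq_true]
          left
          have hidx : i + j' + 1 = m := by omega
          rw [hidx, ← hj']
          exact ⟨beq_iff_eq.mpr hpc, hi4⟩
      · refine ⟨by omega, hi2, by omega, ?_⟩
        have hmi : m + 1 - x = (m - x) + 1 := by omega
        rw [hmi]
        cases x with
        | zero =>
          simp only [Nat.sub_zero] at hqc hi4 ⊢
          simp only [pvJ, Bool.and_eq_true]
          exact ⟨beq_iff_eq.mpr hqc, hi4⟩
        | succ i' =>
          simp only [pvJ, Bool.or_eq_true, Bool.and_eq_true]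
          right
          have hidx : i' + (m - (i' + 1)) + 1 = m := by omega
          rw [hidx]
          exact ⟨beq_iff_eq.mpr hqc, hi4⟩
    · rintro ⟨hx1, hx2, hx3, hJ⟩
      cases x with
      | zero =>
        rw [show m + 1 - 0 = m + 1 from rfl] at hJ hx3
        simp only [pvJ, Bool.and_eq_true] at hJ
        obtain ⟨hqc, hJ0⟩ := hJ
        refine ⟨0, ?_, Or.inr ⟨by omega, by simpa using beq_iff_eq.mp hqc, rfl⟩⟩
        rw [ih]
        exact ⟨Nat.zero_le _, Nat.zero_le _, by omega, by simpa using hJ0⟩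
      | succ x' =>
        by_cases hxm : x' = m
        · subst hxm
          rw [Nat.sub_self] at hJ
          simp only [pvJ, Bool.and_eq_true] at hJ
          obtain ⟨hpc, hJ0⟩ := hJ
          refine ⟨x', ?_, Or.inl ⟨by omega, beq_iff_eq.mp hpc, rfl⟩⟩
          rw [ih]
          exact ⟨le_rfl, by omega, by simp, by simpa [Nat.sub_self] using hJ0⟩
        · have hx'm : x' < m := by omega
          have hj : m + 1 - (x' + 1) = (m - x' - 1) + 1 := by omega
          rw [hj] at hJ
          simp only [pvJ, Bool.or_eq_true, Bool.and_eq_true] at hJ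
          have hidx : x' + (m - x' - 1) + 1 = m := by omega
          rw [hidx] at hJ
          rcases hJ with ⟨hpc, hJ0⟩ | ⟨hqc, hJ0⟩
          · refine ⟨x', ?_, Or.inl ⟨by omega, beq_iff_eq.mp hpc, rfl⟩⟩
            rw [ih]
            refine ⟨by omega, by omega, by omega, ?_⟩
            have h' : m - x' = (m - x' - 1) + 1 := by omega
            rw [h']
            exact hJ0
          · refine ⟨x' + 1, ?_, Or.inr ⟨by omega, ?_, rfl⟩⟩
            · rw [ih]
              refine ⟨by omega, hx2, by omega, ?_⟩
              have h' : m - (x' + 1) = m - x' - 1 := by omega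
              rw [h']
              exact hJ0
            · have h' : m - (x' + 1) = m - x' - 1 := by omega
              rw [h']
              exact beq_iff_eq.mp hqc

lemma pvWindowOK_eq (p q w : List Char) :
    pvWindowOK p q w (p.length + q.length) = pvJ p q w p.length q.length := by
  have h := mem_pvReach p q w (p.length + q.length) p.length
  simp only [Nat.add_sub_cancel_left] at h
  cases hJ : pvJ p q w p.length q.length with
  | false =>
    simp only [pvWindowOK]
    cases hc : PySem.Set.contains (pvReach p q w (p.length + q.length)) p.length with
    | false => rfl
    | true =>
      exfalso
      have hmem := (PySem.Set.contains_iff _ _).mp hc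
      rw [h] at hmem
      rw [hJ] at hmem
      exact absurd hmem.2.2.2 (by simp)
  | true =>
    simp only [pvWindowOK]
    apply (PySem.Set.contains_iff _ _).mpr
    rw [h]
    exact ⟨by omega, le_rfl, le_rfl, hJ⟩

-- filter soundness ----------------------------------------------------------

lemma pvJ_first_char (p q w : List Char) :
    ∀ i j, pvJ p q w i j = true →
      (i = 0 ∧ j = 0) ∨ (1 ≤ i ∧ p.getD 0 ' ' = w.getD 0 ' ') ∨
        (1 ≤ j ∧ q.getD 0 ' ' = w.getD 0 ' ') := by
  intro i j
  induction i, j using pvJ.induct with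
  | case1 => intro _; exact Or.inl ⟨rfl, rfl⟩
  | case2 j ih =>
    intro h
    simp only [pvJ, Bool.and_eq_true] at h
    obtain ⟨hq, hJ⟩ := h
    cases j with
    | zero => exact Or.inr (Or.inr ⟨le_rfl, beq_iff_eq.mp hq⟩)
    | succ j' =>
      rcases ih hJ with ⟨_, h2⟩ | ⟨h1, _⟩ | ⟨_, hc⟩
      · omega
      · omega
      · exact Or.inr (Or.inr ⟨by omega, hc⟩)
  | case3 i ih =>
    intro h
    simp only [pvJ, Bool.and_eq_true] at h
    obtain ⟨hp, hJ⟩ := h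
    cases i with
    | zero => exact Or.inr (Or.inl ⟨le_rfl, beq_iff_eq.mp hp⟩)
    | succ i' =>
      rcases ih hJ with ⟨h1, _⟩ | ⟨_, hc⟩ | ⟨h1, _⟩
      · omega
      · exact Or.inr (Or.inl ⟨by omega, hc⟩)
      · omega
  | case4 i j ih1 ih2 =>
    intro h
    simp only [pvJ, Bool.or_eq_true, Bool.and_eq_true] at h
    rcases h with ⟨_, hJ⟩ | ⟨_, hJ⟩
    · rcases ih1 hJ with ⟨_, h2⟩ | ⟨_, hc⟩ | ⟨_, hc⟩
      · omega
      · exact Or.inr (Or.inl ⟨by omega, hc⟩)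
      · exact Or.inr (Or.inr ⟨by omega, hc⟩)
    · rcases ih2 hJ with ⟨h1, _⟩ | ⟨_, hc⟩ | ⟨_, hc⟩
      · omega
      · exact Or.inr (Or.inl ⟨by omega, hc⟩)
      · exact Or.inr (Or.inr ⟨by omega, hc⟩)

lemma pvJ_chars (p q w : List Char) :
    ∀ i j, i ≤ p.length → j ≤ q.length → pvJ p q w i j = true →
      ∀ m, m < i + j → w.getD m ' ' ∈ p ∨ w.getD m ' ' ∈ q := by
  intro i j
  induction i, j using pvJ.induct with
  | case1 => intro _ _ _ m hm; omega
  | case2 j ih =>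
    intro _ hj h m hm
    simp only [pvJ, Bool.and_eq_true] at h
    obtain ⟨hq, hJ⟩ := h
    by_cases hmj : m = j
    · subst hmj
      right
      rw [← beq_iff_eq.mp hq, List.getD_eq_getElem q ' ' (by omega)]
      exact List.getElem_mem _
    · exact ih (Nat.zero_le _) (by omega) hJ m (by omega)
  | case3 i ih =>
    intro hi _ h m hm
    simp only [pvJ, Bool.and_eq_true] at h
    obtain ⟨hp, hJ⟩ := h
    by_cases hmi : m = i
    · subst hmi
      left
      rw [← beq_iff_eq.mp hp, List.getD_eq_getElem p ' ' (by omega)]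
      exact List.getElem_mem _
    · exact ih (by omega) (Nat.zero_le _) hJ m (by omega)
  | case4 i j ih1 ih2 =>
    intro hi hj h m hm
    simp only [pvJ, Bool.or_eq_true, Bool.and_eq_true] at h
    rcases h with ⟨hp, hJ⟩ | ⟨hq, hJ⟩
    · by_cases hmx : m = i + j + 1
      · subst hmx
        left
        rw [← beq_iff_eq.mp hp, List.getD_eq_getElem p ' ' (by omega)]
        exact List.getElem_mem _
      · exact ih1 (by omega) hj hJ m (by omega)
    · by_cases hmx : m = i + j + 1
      · subst hmx
        right
        rw [← beq_iff_eq.mp hq, List.getD_eq_getElem q ' ' (by omega)]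
        exact List.getElem_mem _
      · exact ih2 hi (by omega) hJ m (by omega)

lemma pvCheckChars_eq_true (p q : List Char) :
    ∀ w : List Char, (∀ c ∈ w, c ∈ p ∨ c ∈ q) → pvCheckChars p q w = true := by
  intro w
  induction w with
  | nil => intro _; rfl
  | cons c cs ih =>
    intro h
    have hc := h c (List.mem_cons_self)
    simp only [pvCheckChars]
    split_ifs with hcond
    · exfalso
      simp only [Bool.and_eq_true, Bool.not_eq_true', List.contains_eq_mem,
        decide_eq_false_iff_not] at hcond
      tauto
    · exact ih (fun c' h' => h c' (List.mem_cons_of_mem _ h'))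

-- outer loops ---------------------------------------------------------------

lemma pvScanWindows_eq (p q : List Char) (ws : List (List Char)) :
    pvScanWindows p q ws =
      if ws.any (fun w => pvMakeMatrixWoven p q w == "1") then "1" else "0" := by
  induction ws with
  | nil => rfl
  | cons w ws ih =>
    by_cases hmm : (pvMakeMatrixWoven p q w == "1") = true
    · simp [pvScanWindows, hmm]
    · rw [Bool.not_eq_true] at hmm
      simp [pvScanWindows, hmm, ih]

lemma pvAltScan_eq (t p q : List Char) (k : Nat) :
    ∀ (n s : Nat), pvAltScan t p q k s n =
      if ∃ m, m < n ∧ pvWindowOK p q ((t.drop (s + m)).take k) k = true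
      then "1" else "0" := by
  intro n
  induction n with
  | zero =>
    intro s
    simp only [pvAltScan]
    rw [if_neg]
    rintro ⟨m, hm, _⟩
    omega
  | succ n ih =>
    intro s
    simp only [pvAltScan, PySem.List.slice_natCast_add]
    cases hok : pvWindowOK p q ((t.drop s).take k) k with
    | true =>
      rw [if_pos rfl, if_pos ⟨0, by omega, by simpa using hok⟩]
    | false =>
      rw [if_neg (by simp), ih (s + 1)]
      have hiff : (∃ m, m < n ∧ pvWindowOK p q ((t.drop (s + 1 + m)).take k) k = true)
          ↔ (∃ m, m < n + 1 ∧ pvWindowOK p q ((t.drop (s + m)).take k) k = true) := by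
        constructor
        · rintro ⟨m, hm, h⟩
          refine ⟨m + 1, by omega, ?_⟩
          have h' : s + (m + 1) = s + 1 + m := by omega
          rw [h']
          exact h
        · rintro ⟨m, hm, h⟩
          cases m with
          | zero =>
            exfalso
            rw [Nat.add_zero, hok] at h
            exact Bool.noConfusion h
          | succ m' =>
            refine ⟨m', by omega, ?_⟩
            have h' : s + 1 + m' = s + (m' + 1) := by omega
            rw [h']
            exact h
      rw [if_congr hiff rfl rfl]

lemma pvFindWindows_eq (t p q : List Char) :
    pvFindWindows t p q =
      ((List.range (t.length + 1 - (p.length + q.length))).filter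
        (fun i =>
          !(!(((t.drop i).take (p.length + q.length)).getD 0 ' ' == p.getD 0 ' ')
              && !(((t.drop i).take (p.length + q.length)).getD 0 ' ' == q.getD 0 ' '))
          && pvCheckChars p q ((t.drop i).take (p.length + q.length)))).map
        (fun i => (t.drop i).take (p.length + q.length)) := by
  simp only [pvFindWindows, PySem.List.slice_natCast_add]
  have hfun : (fun (acc : List (List Char)) (i : Nat) =>
      if !(((t.drop i).take (p.length + q.length)).getD 0 ' ' == p.getD 0 ' ')
          && !(((t.drop i).take (p.length + q.length)).getD 0 ' ' == q.getD 0 ' ') then acc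
      else if pvCheckChars p q ((t.drop i).take (p.length + q.length))
        then acc ++ [(t.drop i).take (p.length + q.length)] else acc)
      = (fun (acc : List (List Char)) (i : Nat) =>
          if (!(!(((t.drop i).take (p.length + q.length)).getD 0 ' ' == p.getD 0 ' ')
                  && !(((t.drop i).take (p.length + q.length)).getD 0 ' ' == q.getD 0 ' '))
              && pvCheckChars p q ((t.drop i).take (p.length + q.length))) = true
          then acc ++ [(t.drop i).take (p.length + q.length)] else acc) := by
    funext acc i
    cases hbad : (!(((t.drop i).take (p.length + q.length)).getD 0 ' ' == p.getD 0 ' ')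
        && !(((t.drop i).take (p.length + q.length)).getD 0 ' ' == q.getD 0 ' ')) <;>
      cases hchk : pvCheckChars p q ((t.drop i).take (p.length + q.length)) <;>
        simp [*]
  rw [hfun, PySem.List.foldl_append_if]
  simp

-- ===== VERDICT (by name: the statement is the Claim_ definition above) =====
theorem InterwovenStrings_spec : Claim_equal_InterwovenStrings := by
  unfold Claim_equal_InterwovenStrings
  intro t p q _ hpre
  unfold Spec_InterwovenStrings
  simp only [InterwovenStrings, InterwovenStrings_alt]
  rw [pvFindWindows_eq, pvAltScan_eq]
  rcases hpre with hlen | ⟨hp, hq⟩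
  · have hN0 : t.toList.length + 1 - (p.toList.length + q.toList.length) = 0 := by omega
    rw [hN0]
    simp
  · set tl := t.toList with htl
    set pl := p.toList with hpl
    set ql := q.toList with hql
    set k := pl.length + ql.length with hk
    set N := tl.length + 1 - k with hNdef
    have hp1 : 1 ≤ pl.length := List.length_pos_iff.mpr hp
    have hq1 : 1 ≤ ql.length := List.length_pos_iff.mpr hq
    have hwlen : ∀ s, s < N → ((tl.drop s).take k).length = k := by
      intro s hs
      rw [List.length_take, List.length_drop]
      omega
    have hcore : ∀ s, s < N →
        ((pvMakeMatrixWoven pl ql ((tl.drop s).take k) == "1") = true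
          ↔ pvWindowOK pl ql ((tl.drop s).take k) k = true) := by
      intro s _
      rw [pvMakeMatrixWoven_eq, hk, pvWindowOK_eq]
      simp
    have hpass : ∀ s, s < N → pvJ pl ql ((tl.drop s).take k) pl.length ql.length = true →
        (!(!(((tl.drop s).take k).getD 0 ' ' == pl.getD 0 ' ')
            && !(((tl.drop s).take k).getD 0 ' ' == ql.getD 0 ' '))
          && pvCheckChars pl ql ((tl.drop s).take k)) = true := by
      intro s hs hJ
      rw [Bool.and_eq_true]
      constructor
      · rcases pvJ_first_char pl ql ((tl.drop s).take k) pl.length ql.length hJ with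
          ⟨h1, _⟩ | ⟨_, hc⟩ | ⟨_, hc⟩
        · omega
        · have hb : (((tl.drop s).take k).getD 0 ' ' == pl.getD 0 ' ') = true :=
            beq_iff_eq.mpr hc.symm
          rw [hb]
          simp
        · have hb : (((tl.drop s).take k).getD 0 ' ' == ql.getD 0 ' ') = true :=
            beq_iff_eq.mpr hc.symm
          rw [hb]
          simp
      · apply pvCheckChars_eq_true
        intro c hcmem
        obtain ⟨n, hn, rfl⟩ := List.mem_iff_getElem.mp hcmem
        rw [← List.getD_eq_getElem _ ' ' hn]
        apply pvJ_chars pl ql _ pl.length ql.length le_rfl le_rfl hJ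
        rw [hwlen s hs] at hn
        omega
    set subs := ((List.range N).filter
        (fun i =>
          !(!(((tl.drop i).take k).getD 0 ' ' == pl.getD 0 ' ')
              && !(((tl.drop i).take k).getD 0 ' ' == ql.getD 0 ' '))
          && pvCheckChars pl ql ((tl.drop i).take k))).map
        (fun i => (tl.drop i).take k) with hsubsdef
    have hiff : (subs.any (fun w => pvMakeMatrixWoven pl ql w == "1")) = true ↔
        (∃ m, m < N ∧ pvWindowOK pl ql ((tl.drop (0 + m)).take k) k = true) := by
      constructor
      · intro hany
        obtain ⟨w, hw, hMM⟩ := List.any_eq_true.mp hany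
        obtain ⟨m, hmf, rfl⟩ := List.mem_map.mp hw
        have hmr := List.mem_filter.mp hmf
        have hmN : m < N := List.mem_range.mp hmr.1
        refine ⟨m, hmN, ?_⟩
        rw [Nat.zero_add]
        exact (hcore m hmN).mp hMM
      · rintro ⟨m, hm, hok⟩
        rw [Nat.zero_add] at hok
        apply List.any_eq_true.mpr
        have hJ : pvJ pl ql ((tl.drop m).take k) pl.length ql.length = true := by
          rw [hk] at hok
          rw [pvWindowOK_eq] at hok
          exact hok
        exact ⟨(tl.drop m).take k,
          List.mem_map.mpr ⟨m,
            List.mem_filter.mpr ⟨List.mem_range.mpr hm, hpass m hm hJ⟩, rfl⟩,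
          (hcore m hm).mpr hok⟩
    by_cases hex : ∃ m, m < N ∧ pvWindowOK pl ql ((tl.drop (0 + m)).take k) k = true
    · rw [if_pos hex]
      have hany := hiff.mpr hex
      have hne : subs ≠ [] := by
        intro h0
        rw [h0] at hany
        exact Bool.noConfusion hany
      rw [if_neg hne, pvScanWindows_eq, if_pos hany]
    · rw [if_neg hex]
      by_cases hsubs : subs = []
      · rw [if_pos hsubs]
      · rw [if_neg hsubs, pvScanWindows_eq, if_neg (fun hany => hex (hiff.mp hany))]
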